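-- pv_equiv track=rewrite | github.com/yunj9877-dot/MediScanner | scripts/evaluate_accuracy.py | check_hit_semantic
-- ===== SOURCE A (Python) =====
-- def check_hit_semantic(semantic_docs: list, keywords: list) -> dict:
--     """시맨틱 검색 결과에서 Hit 확인 (문서 내용 직접 사용)"""
--     results = {"top3": False, "top5": False, "top10": False}
--
--     for i, doc in enumerate(semantic_docs[:10]):
--         content = doc.get("content", "").lower()
--
--         # 키워드 중 하나라도 포함되면 Hit
--         hit = any(kw.lower() in content for kw in keywords)
--
--         if hit:
--             if i < 3:
--                 results["top3"] = True
--                 results["top5"] = True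
--                 results["top10"] = True
--                 break
--             elif i < 5:
--                 results["top5"] = True
--                 results["top10"] = True
--             elif i < 10:
--                 results["top10"] = True
--
--     return results
-- ===== SOURCE B (Python) =====
-- def check_hit_semantic(semantic_docs: list, keywords: list) -> dict:
--     """Cumulative hits over the three disjoint rank bands [:3], [3:5], [5:10]."""
--     kws = [kw.lower() for kw in keywords]
--
--     def band_hit(docs):
--         return any(kw in doc.get("content", "").lower() for doc in docs for kw in kws)
--
--     top3 = band_hit(semantic_docs[:3])
--     top5 = top3 or band_hit(semantic_docs[3:5])
--     top10 = top5 or band_hit(semantic_docs[5:10])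
--     return {"top3": top3, "top5": top5, "top10": top10}
-- ===== Notes on version B (the rewrite author's own statement) =====
-- stated objective: simpler
-- what changed: Replaces A's single indexed scan with early break and incremental flag mutation by three independent any-hit tests over the disjoint rank bands [:3], [3:5], [5:10], OR-ed cumulatively; no index bookkeeping at all.
import Mathlib
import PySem

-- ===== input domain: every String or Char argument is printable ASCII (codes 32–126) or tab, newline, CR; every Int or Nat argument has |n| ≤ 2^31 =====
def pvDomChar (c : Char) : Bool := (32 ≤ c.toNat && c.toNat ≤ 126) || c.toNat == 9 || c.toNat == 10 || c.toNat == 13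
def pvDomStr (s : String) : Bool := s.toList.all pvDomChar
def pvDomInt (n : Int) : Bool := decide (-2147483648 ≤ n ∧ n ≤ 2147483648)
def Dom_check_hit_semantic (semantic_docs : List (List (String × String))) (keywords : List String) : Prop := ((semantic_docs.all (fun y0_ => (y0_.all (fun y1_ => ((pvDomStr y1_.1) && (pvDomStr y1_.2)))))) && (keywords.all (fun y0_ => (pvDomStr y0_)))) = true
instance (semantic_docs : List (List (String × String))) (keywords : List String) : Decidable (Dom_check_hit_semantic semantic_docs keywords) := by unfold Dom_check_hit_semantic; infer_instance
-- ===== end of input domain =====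

-- B drops A's indexed scan with break and incremental flag mutation, instead testing the three
-- disjoint rank bands [:3], [3:5], [5:10] independently and OR-ing cumulatively; objective: simpler.

-- ===== PORT A =====
-- the body of A's for-loop over enumerate(semantic_docs[:10]); "break" = return the dict now
def pvLoopA (keywords : List String) (i : Nat) (docs : List (List (String × String)))
    (results : PySem.Dict String Bool) : PySem.Dict String Bool :=
  match docs with
  | [] => results
  | doc :: rest =>
    let content := PySem.Str.lower ((PySem.Dict.mk doc).getD "content" "")
    let hit := keywords.any (fun kw => PySem.Str.isIn (PySem.Str.lower kw) content)
    if hit then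
      if i < 3 then
        ((results.insert "top3" true).insert "top5" true).insert "top10" true  -- break
      else if i < 5 then
        pvLoopA keywords (i + 1) rest ((results.insert "top5" true).insert "top10" true)
      else if i < 10 then
        pvLoopA keywords (i + 1) rest (results.insert "top10" true)
      else
        pvLoopA keywords (i + 1) rest results
    else
      pvLoopA keywords (i + 1) rest results

def check_hit_semantic (semantic_docs : List (List (String × String))) (keywords : List String) : List (String × Bool) :=
  let results : PySem.Dict String Bool := PySem.Dict.mk [("top3", false), ("top5", false), ("top10", false)]
  (pvLoopA keywords 0 (PySem.List.slice semantic_docs none (some 10)) results).items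

-- ===== PORT B =====
-- Source B's band_hit: any keyword occurs in any of the given docs
def pvBandHit (kws : List String) (docs : List (List (String × String))) : Bool :=
  docs.any (fun doc => kws.any (fun kw => PySem.Str.isIn kw (PySem.Str.lower ((PySem.Dict.mk doc).getD "content" ""))))

def check_hit_semantic_alt (semantic_docs : List (List (String × String))) (keywords : List String) : List (String × Bool) :=
  let kws := keywords.map PySem.Str.lower
  let top3 := pvBandHit kws (PySem.List.slice semantic_docs none (some 3))
  let top5 := top3 || pvBandHit kws (PySem.List.slice semantic_docs (some 3) (some 5))
  let top10 := top5 || pvBandHit kws (PySem.List.slice semantic_docs (some 5) (some 10))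
  [("top3", top3), ("top5", top5), ("top10", top10)]

-- ===== PRECONDITION & SPEC =====
def Spec_check_hit_semantic (semantic_docs : List (List (String × String))) (keywords : List String) (out : List (String × Bool)) : Prop := out = check_hit_semantic_alt semantic_docs keywords
instance (semantic_docs : List (List (String × String))) (keywords : List String) (out : List (String × Bool)) : Decidable (Spec_check_hit_semantic semantic_docs keywords out) := by unfold Spec_check_hit_semantic; infer_instance

-- ===== CLAIM =====
def Claim_equal_check_hit_semantic : Prop := ∀ (semantic_docs : List (List (String × String))) (keywords : List String), Dom_check_hit_semantic semantic_docs keywords → Spec_check_hit_semantic semantic_docs keywords (check_hit_semantic semantic_docs keywords)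

-- ===== LEMMAS AND PROOFS =====

-- the per-doc hit predicate shared by both sides (B lowers the keywords once up front)
def pvHit (kws : List String) (doc : List (String × String)) : Bool :=
  kws.any (fun kw => PySem.Str.isIn kw (PySem.Str.lower ((PySem.Dict.mk doc).getD "content" "")))

theorem bandHit_eq_any (kws : List String) (docs : List (List (String × String))) :
    pvBandHit kws docs = docs.any (pvHit kws) := rfl

-- A's per-doc hit test equals B's
theorem hitA_eq_hit (keywords : List String) (doc : List (String × String)) :
    (keywords.any (fun kw => PySem.Str.isIn (PySem.Str.lower kw)
        (PySem.Str.lower ((PySem.Dict.mk doc).getD "content" "")))) =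
    pvHit (keywords.map PySem.Str.lower) doc := by
  simp [pvHit, List.any_map, Function.comp_def, PySem.Str.toList_lower]

theorem dict_eq_of_items {κ ν : Type} (d d' : PySem.Dict κ ν) (h : d.items = d'.items) : d = d' := by
  cases d; cases d'; cases h; rfl

theorem ins_break (b3 b5 b10 : Bool) :
    ((((PySem.Dict.mk [("top3", b3), ("top5", b5), ("top10", b10)]).insert "top3" true).insert "top5" true).insert "top10" true)
      = PySem.Dict.mk [("top3", true), ("top5", true), ("top10", true)] :=
  dict_eq_of_items _ _ (by simp [PySem.Dict.insert])

theorem ins_5 (b3 b5 b10 : Bool) :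
    (((PySem.Dict.mk [("top3", b3), ("top5", b5), ("top10", b10)]).insert "top5" true).insert "top10" true)
      = PySem.Dict.mk [("top3", b3), ("top5", true), ("top10", true)] :=
  dict_eq_of_items _ _ (by simp [PySem.Dict.insert])

theorem ins_10 (b3 b5 b10 : Bool) :
    ((PySem.Dict.mk [("top3", b3), ("top5", b5), ("top10", b10)]).insert "top10" true)
      = PySem.Dict.mk [("top3", b3), ("top5", b5), ("top10", true)] :=
  dict_eq_of_items _ _ (by simp [PySem.Dict.insert])

-- A's loop, started at index i, ends with the first-hit-index flags OR-ed onto the initial flags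
theorem loop_spec (keywords : List String) (docs : List (List (String × String)))
    (i : Nat) (b3 b5 b10 : Bool) :
    (pvLoopA keywords i docs (PySem.Dict.mk [("top3", b3), ("top5", b5), ("top10", b10)])).items =
      (let m := docs.findIdx? (pvHit (keywords.map PySem.Str.lower))
       [("top3", b3 || m.elim false (fun j => decide (i + j < 3))),
        ("top5", b5 || m.elim false (fun j => decide (i + j < 5))),
        ("top10", b10 || m.elim false (fun j => decide (i + j < 10)))]) := by
  induction docs generalizing i b3 b5 b10 with
  | nil => simp [pvLoopA]
  | cons doc rest ih =>
    rw [pvLoopA]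
    simp only [List.findIdx?_cons, hitA_eq_hit]
    by_cases hhit : pvHit (keywords.map PySem.Str.lower) doc
    · simp only [hhit, reduceIte, Option.elim_some]
      by_cases h3 : i < 3
      · rw [if_pos h3, ins_break]
        simp [h3, show i < 5 by omega, show i < 10 by omega]
      · rw [if_neg h3]
        by_cases h5 : i < 5
        · rw [if_pos h5, ins_5, ih]
          rcases hfi : List.findIdx? (pvHit (keywords.map PySem.Str.lower)) rest with _ | j
          · simp [h3, h5, show i < 10 by omega]
          · simp [h3, h5, show i < 10 by omega, show ¬ i + 1 + j < 3 by omega]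
        · rw [if_neg h5]
          by_cases h10 : i < 10
          · rw [if_pos h10, ins_10, ih]
            rcases hfi : List.findIdx? (pvHit (keywords.map PySem.Str.lower)) rest with _ | j
            · simp [h3, h5, h10]
            · simp [h3, h5, h10, show ¬ i + 1 + j < 3 by omega, show ¬ i + 1 + j < 5 by omega]
          · rw [if_neg h10, ih]
            rcases hfi : List.findIdx? (pvHit (keywords.map PySem.Str.lower)) rest with _ | j
            · simp [h3, h5, h10]
            · simp [h3, h5, h10, show ¬ i + 1 + j < 3 by omega, show ¬ i + 1 + j < 5 by omega,
                    show ¬ i + 1 + j < 10 by omega]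
    · simp only [hhit, Bool.false_eq_true, reduceIte]
      rw [ih]
      rcases hfi : List.findIdx? (pvHit (keywords.map PySem.Str.lower)) rest with _ | j
      · simp
      · simp [show i + 1 + j = i + (j + 1) by omega]

-- "first hit index < k" is exactly "some hit in the first k elements"
theorem fi_take {α : Type} (p : α → Bool) (xs : List α) (k : Nat) :
    ((xs.findIdx? p).elim false (fun j => decide (j < k))) = (xs.take k).any p := by
  induction xs generalizing k with
  | nil => simp
  | cons x rest ih =>
    rw [List.findIdx?_cons]
    cases hp : p x with
    | true =>
      cases k with
      | zero => simp
      | succ k => simp; exact Or.inl hp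
    | false =>
      simp only [Bool.false_eq_true, reduceIte]
      cases k with
      | zero => rcases List.findIdx? p rest with _ | j <;> simp
      | succ k =>
        rw [List.take_succ_cons, List.any_cons, hp, Bool.false_or, ← ih k]
        rcases List.findIdx? p rest with _ | j
        · simp
        · simp

-- ===== VERDICT =====
theorem check_hit_semantic_spec : Claim_equal_check_hit_semantic := by
  intro semantic_docs keywords _
  unfold Spec_check_hit_semantic check_hit_semantic check_hit_semantic_alt
  rw [loop_spec]
  have h3 : PySem.List.slice semantic_docs none (some 3) = semantic_docs.take 3 := by
    simpa using PySem.List.slice_to_natCast semantic_docs 3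
  have h35 : PySem.List.slice semantic_docs (some 3) (some 5) = (semantic_docs.drop 3).take 2 := by
    simpa using PySem.List.slice_natCast semantic_docs 3 5
  have h510 : PySem.List.slice semantic_docs (some 5) (some 10) = (semantic_docs.drop 5).take 5 := by
    simpa using PySem.List.slice_natCast semantic_docs 5 10
  have h10 : PySem.List.slice semantic_docs none (some 10) = semantic_docs.take 10 := by
    simpa using PySem.List.slice_to_natCast semantic_docs 10
  have t5' : semantic_docs.take 5 = semantic_docs.take 3 ++ (semantic_docs.drop 3).take 2 := by
    rw [show (5 : Nat) = 3 + 2 from rfl, List.take_add]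
  have t3 : (semantic_docs.take 10).take 3 = semantic_docs.take 3 := by
    rw [List.take_take]; norm_num
  have t5 : (semantic_docs.take 10).take 5 =
      semantic_docs.take 3 ++ (semantic_docs.drop 3).take 2 := by
    rw [List.take_take]; norm_num; exact t5'
  have t10 : (semantic_docs.take 10).take 10 =
      (semantic_docs.take 3 ++ (semantic_docs.drop 3).take 2) ++ (semantic_docs.drop 5).take 5 := by
    rw [List.take_take, min_self, show (10 : Nat) = 5 + 5 from rfl, List.take_add, t5']
  simp only [h3, h35, h510, h10, bandHit_eq_any, Nat.zero_add, Bool.false_or, fi_take]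
  rw [t3, t5, t10]
  simp [Bool.or_assoc]
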